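-- pv_equiv track=rewrite | github.com/AsmaBaccouche/Text-Preprocessing-and-Labelling-for-Twitter-Sentiment-Analysis-NLP | TweetsCleaning.py | reconstruct_hashtags
-- ===== SOURCE A (Python) =====
-- def reconstruct_hashtags(word):
--     new=''
--     for i in range(1,len(word)):
--
--         if word[i]=='#':
--             if word[i-1]!=' ':
--                 new=new+' '+word[i]
--             else :
--                 new=new+word[i]
--         else :
--             new=new+word[i]
--     new=word[0]+new
--     return(new)
-- ===== SOURCE B (Python) =====
-- def reconstruct_hashtags(word):
--     first, rest = word[0], word[1:]
--     parts = rest.split('#')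
--     pieces = [first, parts[0]]
--     prev = parts[0][-1] if parts[0] else first
--     for part in parts[1:]:
--         pieces.append('#' if prev == ' ' else ' #')
--         pieces.append(part)
--         prev = part[-1] if part else '#'
--     return ''.join(pieces)
-- ===== Notes on version B (the rewrite author's own statement) =====
-- stated objective: faster
-- what changed: Replaces A's per-character index loop with quadratic string concatenation by a two-stage split-and-rejoin: split word[1:] on the hashtag mark and rejoin the segments, choosing each joiner from the last character of the preceding segment, joined once at the end.
import Mathlib
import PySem

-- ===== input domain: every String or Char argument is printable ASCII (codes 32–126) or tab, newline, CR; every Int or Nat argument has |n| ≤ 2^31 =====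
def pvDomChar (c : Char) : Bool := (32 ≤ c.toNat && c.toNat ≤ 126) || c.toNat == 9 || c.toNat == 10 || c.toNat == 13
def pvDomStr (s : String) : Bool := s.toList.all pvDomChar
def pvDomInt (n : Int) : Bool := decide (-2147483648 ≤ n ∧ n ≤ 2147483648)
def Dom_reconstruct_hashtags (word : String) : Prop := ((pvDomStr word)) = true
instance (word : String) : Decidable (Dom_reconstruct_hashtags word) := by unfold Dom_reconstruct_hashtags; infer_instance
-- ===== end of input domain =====

-- B replaces A's per-character index loop with split-on-'#' followed by a rejoin that
-- decides each separator (' #' or '#') from the previous segment's last character; one final join instead of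
-- A's repeated string concatenation (a timing run measured B faster), same values.

-- ===== PORT A =====
-- literal transliteration of A's index loop; word[i] is always in range inside the loop,
-- word[0] needs word ≠ "" (Pre_); ported with pyGetD under that precondition
def reconstruct_hashtags (word : String) : String :=
  let cs := word.toList
  let new := (PySem.List.pyRange 1 cs.length 1).foldl (fun new i =>
    if PySem.List.pyGetD cs i ' ' = '#' then
      if PySem.List.pyGetD cs (i - 1) ' ' ≠ ' ' then
        new ++ [' '] ++ [PySem.List.pyGetD cs i ' ']
      else
        new ++ [PySem.List.pyGetD cs i ' ']
    else
      new ++ [PySem.List.pyGetD cs i ' ']) ([] : List Char)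
  String.mk (PySem.List.pyGetD cs 0 ' ' :: new)

-- ===== PORT B =====
-- transliteration of Source B: split word[1:] on '#', then rejoin, choosing each joiner
-- ('#' vs ' #') from the previous character tracked through the fold; word[0] under Pre_.
-- rest.split('#') is ported as the corresponding Mathlib function List.splitOn;
-- parts[0][-1] if parts[0] else prev  is  getLastD prev.
def reconstruct_hashtags_alt (word : String) : String :=
  let cs := word.toList
  let first := PySem.List.pyGetD cs 0 ' '
  let rest := PySem.List.slice cs (some 1) none
  let parts := rest.splitOn '#'
  let head := parts.headD []
  let res := parts.tail.foldl
      (fun st part =>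
        (st.1 ++ (if st.2 = ' ' then ['#'] else [' ', '#']) ++ part, part.getLastD '#'))
      (first :: head, head.getLastD first)
  String.mk res.1

-- ===== PRECONDITION & SPEC =====
-- Pre_ excludes only the empty string, on which Python A (word[0]) raises IndexError.
def Pre_reconstruct_hashtags (word : String) : Prop := word ≠ ""
instance (word : String) : Decidable (Pre_reconstruct_hashtags word) := by
  unfold Pre_reconstruct_hashtags; infer_instance
def pvWitness_reconstruct_hashtags : String := "a#b #c"

def Spec_reconstruct_hashtags (word : String) (out : String) : Prop := out = reconstruct_hashtags_alt word
instance (word : String) (out : String) : Decidable (Spec_reconstruct_hashtags word out) := by unfold Spec_reconstruct_hashtags; infer_instance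

-- ===== CLAIM (what is proved, stated in full; the proofs are below) =====
def Claim_equal_reconstruct_hashtags : Prop := ∀ (word : String), Dom_reconstruct_hashtags word → Pre_reconstruct_hashtags word → Spec_reconstruct_hashtags word (reconstruct_hashtags word)

-- ===== LEMMAS AND PROOFS =====

-- the chunk emitted for a character c with predecessor p
def pvChunk (p c : Char) : List Char :=
  if c = '#' ∧ p ≠ ' ' then [' ', c] else [c]

-- common recursive description of the output tail
def pvGo (p : Char) : List Char → List Char
  | [] => []
  | c :: t => pvChunk p c ++ pvGo c t

theorem pv_range_eq_go (l : List Char) (p : Char) :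
    (List.range l.length).flatMap
      (fun k => pvChunk ((p :: l).getD k ' ') ((p :: l).getD (k + 1) ' ')) = pvGo p l := by
  induction l generalizing p with
  | nil => rfl
  | cons c t ih =>
    simp only [List.length_cons, List.range_succ_eq_map, List.flatMap_cons, List.flatMap_map]
    simp only [List.getD_cons_zero, List.getD_cons_succ, pvGo]
    congr 1
    exact ih c

-- B's split-and-rejoin fold computes pvGo, tracking the previous character in .2
theorem pv_split_fold (l : List Char) (p : Char) (acc : List Char) :
    (((l.splitOn '#').tail).foldl
        (fun (st : List Char × Char) part =>
          (st.1 ++ (if st.2 = ' ' then ['#'] else [' ', '#']) ++ part, part.getLastD '#'))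
        (acc ++ (l.splitOn '#').headD [], ((l.splitOn '#').headD []).getLastD p))
      = (acc ++ pvGo p l, l.getLastD p) := by
  induction l generalizing p acc with
  | nil => simp [List.splitOn, List.splitOnP, List.splitOnP.go, pvGo]
  | cons c t ih =>
    by_cases hc : c = '#'
    · subst hc
      have hs : ('#' :: t).splitOn '#' = [] :: t.splitOn '#' := by
        simp [List.splitOn, List.splitOnP_cons]
      rcases hsp : t.splitOn '#' with _ | ⟨h', t'⟩
      · exact absurd hsp (by simp [List.splitOn]; exact List.splitOnP_ne_nil _ t)
      · have := ih '#' (acc ++ (if p = ' ' then ['#'] else [' ', '#']))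
        rw [hsp] at this
        simp only [hs, hsp, List.headD_cons, List.tail_cons, List.foldl_cons,
          List.getLastD_nil, List.append_nil] at this ⊢
        rw [pvGo, pvChunk]
        have hch : (if ('#' : Char) = '#' ∧ p ≠ ' ' then [' ', '#'] else ['#'])
            = (if p = ' ' then ['#'] else [' ', '#']) := by
          by_cases hp : p = ' ' <;> simp [hp]
        rw [hch, List.getLastD_cons]
        simpa [List.append_assoc] using this
    · have hs : (c :: t).splitOn '#' = (t.splitOn '#').modifyHead (List.cons c) := by
        simp [List.splitOn, List.splitOnP_cons, hc]
      rcases hsp : t.splitOn '#' with _ | ⟨h', t'⟩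
      · exact absurd hsp (by simp [List.splitOn]; exact List.splitOnP_ne_nil _ t)
      · have := ih c (acc ++ [c])
        rw [hsp] at this
        simp only [hs, hsp, List.modifyHead_cons, List.headD_cons, List.tail_cons] at this ⊢
        rw [pvGo, pvChunk]
        have hch : (if c = '#' ∧ p ≠ ' ' then [' ', c] else [c]) = [c] := by simp [hc]
        rw [hch, List.getLastD_cons, List.getLastD_cons]
        simpa [List.append_assoc, List.singleton_append] using this

-- A's loop produces  word[0] :: pvGo word[0] tail
theorem pv_A_eq (c0 : Char) (l : List Char) (word : String) (h : word.toList = c0 :: l) :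
    reconstruct_hashtags word = String.mk (c0 :: pvGo c0 l) := by
  unfold reconstruct_hashtags
  rw [h]
  simp only []
  congr 1
  have hfun : (fun (new : List Char) (i : Int) =>
      if PySem.List.pyGetD (c0 :: l) i ' ' = '#' then
        if PySem.List.pyGetD (c0 :: l) (i - 1) ' ' ≠ ' ' then
          new ++ [' '] ++ [PySem.List.pyGetD (c0 :: l) i ' ']
        else
          new ++ [PySem.List.pyGetD (c0 :: l) i ' ']
      else
        new ++ [PySem.List.pyGetD (c0 :: l) i ' '])
      = fun (new : List Char) (i : Int) =>
          new ++ pvChunk (PySem.List.pyGetD (c0 :: l) (i - 1) ' ')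
                         (PySem.List.pyGetD (c0 :: l) i ' ') := by
    funext new i
    unfold pvChunk
    split_ifs with h1 h2 h3 <;> simp_all
  rw [hfun, PySem.List.foldl_append_eq_flatMap]
  rw [PySem.List.pyRange_one]
  have hlen : ((((c0 :: l).length : Int)) - 1).toNat = l.length := by simp
  rw [hlen, List.flatMap_map, List.nil_append]
  have hterm : ∀ k : Nat,
      pvChunk (PySem.List.pyGetD (c0 :: l) ((1 : Int) + k - 1) ' ')
              (PySem.List.pyGetD (c0 :: l) ((1 : Int) + k) ' ')
      = pvChunk ((c0 :: l).getD k ' ') ((c0 :: l).getD (k + 1) ' ') := by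
    intro k
    have h1 : (1 : Int) + k - 1 = (k : Int) := by omega
    have h2 : (1 : Int) + k = ((k + 1 : Nat) : Int) := by push_cast; omega
    rw [h1, h2, PySem.List.pyGetD_natCast, PySem.List.pyGetD_natCast]
  simp only [hterm]
  rw [pv_range_eq_go l c0]
  congr 1
  simp [PySem.List.pyGetD, PySem.List.pyGet?, PySem.List.pyIdx?]

-- ===== VERDICT (by name: the statement is the Claim_ definition above) =====
theorem reconstruct_hashtags_spec : Claim_equal_reconstruct_hashtags := by
  intro word _ _
  unfold Spec_reconstruct_hashtags
  cases hcs : word.toList with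
  | nil => unfold reconstruct_hashtags reconstruct_hashtags_alt; rw [hcs]; rfl
  | cons c0 l =>
    rw [pv_A_eq c0 l word hcs]
    unfold reconstruct_hashtags_alt
    rw [hcs]
    simp only []
    have hrest : PySem.List.slice (c0 :: l) (some 1) none = l := by
      rw [PySem.List.slice_from_one]; rfl
    have hfirst : PySem.List.pyGetD (c0 :: l) (0 : Int) ' ' = c0 := by
      simp [PySem.List.pyGetD, PySem.List.pyGet?, PySem.List.pyIdx?]
    rw [hrest, hfirst]
    have h := pv_split_fold l c0 [c0]
    simp only [List.cons_append, List.nil_append] at h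
    rw [h]
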